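-- pv_equiv track=rewrite | github.com/Moffran/calibrated_explanations | scripts/over_testing/coverage_xml_gaps.py | find_blocks
-- ===== SOURCE A (Python) =====
-- def find_blocks(lines_map, threshold=20):
--     blocks = []
--     sorted_lines = sorted(lines_map.keys())
--     start = None
--     prev = None
--     for ln in sorted_lines:
--         hit = lines_map.get(ln, 0)
--         if hit == 0:
--             if start is None:
--                 start = ln
--             prev = ln
--         else:
--             if start is not None:
--                 if prev - start + 1 >= threshold:
--                     blocks.append((start, prev))
--                 start = None
--                 prev = None
--     if start is not None and prev is not None and prev - start + 1 >= threshold: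
--         blocks.append((start, prev))
--     return blocks
-- ===== SOURCE B (Python) =====
-- def find_blocks(lines_map, threshold=20):
--     # Two-pointer run scanner over the sorted keys: find each maximal run of
--     # zero-hit keys in one inner scan, emit its span if long enough, jump past it.
--     keys = sorted(lines_map.keys())
--     blocks = []
--     i, n = 0, len(keys)
--     while i < n:
--         if lines_map.get(keys[i], 0) != 0:
--             i += 1
--             continue
--         j = i + 1
--         while j < n and lines_map.get(keys[j], 0) == 0:
--             j += 1
--         last = keys[j - 1]
--         if last - keys[i] + 1 >= threshold:
--             blocks.append((keys[i], last))
--         i = j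
--     return blocks
-- ===== Notes on version B (the rewrite author's own statement) =====
-- stated objective: alternative
-- what changed: Replaces A's start/prev Option state machine with a two-pointer run scanner: for each zero-hit key it finds the whole maximal zero run in one inner scan, emits its span, and jumps past the run.
import Mathlib
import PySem

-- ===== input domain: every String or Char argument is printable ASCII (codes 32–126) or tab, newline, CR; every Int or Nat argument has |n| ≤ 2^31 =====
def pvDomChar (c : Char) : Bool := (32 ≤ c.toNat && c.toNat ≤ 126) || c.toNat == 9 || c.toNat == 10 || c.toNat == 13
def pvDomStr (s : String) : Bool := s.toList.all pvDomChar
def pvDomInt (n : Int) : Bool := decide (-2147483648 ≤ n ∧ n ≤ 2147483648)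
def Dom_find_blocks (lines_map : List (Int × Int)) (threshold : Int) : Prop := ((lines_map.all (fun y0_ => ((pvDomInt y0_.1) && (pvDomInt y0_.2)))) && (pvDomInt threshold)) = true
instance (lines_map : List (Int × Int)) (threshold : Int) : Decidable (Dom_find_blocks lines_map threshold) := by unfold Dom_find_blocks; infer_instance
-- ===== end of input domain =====

-- B replaces A's start/prev Option state machine with a run scanner over the sorted
-- keys (find each maximal zero-hit run at once, emit its span, jump past it): an
-- alternative decomposition of the same O(n log n) task.


-- ===== PORT A =====
-- A's loop body: state = (blocks, start, prev)
def stepA (d : PySem.Dict Int Int) (threshold : Int)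
    (st : List (Int × Int) × Option Int × Option Int) (ln : Int) :
    List (Int × Int) × Option Int × Option Int :=
  let (blocks, start, prev) := st
  let hit := d.getD ln 0
  if hit = 0 then
    (blocks, (if start = none then some ln else start), some ln)
  else
    match start, prev with
    | some s, some p =>
        ((if threshold ≤ p - s + 1 then blocks ++ [(s, p)] else blocks), none, none)
    | some _, none => (blocks, none, none)  -- unreachable: prev is set whenever start is
    | none, _ => (blocks, start, prev)

-- A's trailing 'if start is not None and prev is not None and …' check
def finA (threshold : Int) (st : List (Int × Int) × Option Int × Option Int) :
    List (Int × Int) :=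
  match st with
  | (blocks, some s, some p) =>
      if threshold ≤ p - s + 1 then blocks ++ [(s, p)] else blocks
  | (blocks, _, _) => blocks

def find_blocks (lines_map : List (Int × Int)) (threshold : Int) : List (Int × Int) :=
  let d := PySem.Dict.ofList lines_map
  let sorted_lines := PySem.List.sorted d.keys (fun x => x) false
  finA threshold (sorted_lines.foldl (stepA d threshold) ([], none, none))

-- ===== PORT B =====
-- B's outer while loop: on a zero-hit key, the inner scan (takeWhile/dropWhile)
-- finds the whole maximal zero run, the block is emitted, and the scan resumes
-- past the run.
def goB (d : PySem.Dict Int Int) (threshold : Int) : List Int → List (Int × Int)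
  | [] => []
  | ln :: rest =>
    if d.getD ln 0 ≠ 0 then goB d threshold rest
    else
      let run := rest.takeWhile (fun x => d.getD x 0 == 0)
      let last := run.getLastD ln
      (if threshold ≤ last - ln + 1 then [(ln, last)] else []) ++
        goB d threshold (rest.dropWhile (fun x => d.getD x 0 == 0))
termination_by ks => ks.length
decreasing_by
  · simp
  · simp only [List.length_cons]
    exact Nat.lt_succ_of_le (List.length_dropWhile_le _ rest)

def find_blocks_alt (lines_map : List (Int × Int)) (threshold : Int) : List (Int × Int) :=
  let d := PySem.Dict.ofList lines_map
  goB d threshold (PySem.List.sorted d.keys (fun x => x) false)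

-- ===== PRECONDITION & SPEC =====
def Spec_find_blocks (lines_map : List (Int × Int)) (threshold : Int) (out : List (Int × Int)) : Prop := out = find_blocks_alt lines_map threshold
instance (lines_map : List (Int × Int)) (threshold : Int) (out : List (Int × Int)) : Decidable (Spec_find_blocks lines_map threshold out) := by unfold Spec_find_blocks; infer_instance

-- ===== CLAIM (what is proved, stated in full; the proofs are below) =====
def Claim_equal_find_blocks : Prop := ∀ (lines_map : List (Int × Int)) (threshold : Int), Dom_find_blocks lines_map threshold → Spec_find_blocks lines_map threshold (find_blocks lines_map threshold)

-- ===== LEMMAS AND PROOFS =====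

-- Processing an in-run state (some s, some p): A scans to the end of the zero run,
-- emits (s, last) if long enough, and continues fresh from just past the first
-- non-zero key.
theorem finA_foldl_run (d : PySem.Dict Int Int) (threshold : Int)
    (rest : List Int) : ∀ (acc : List (Int × Int)) (s p : Int),
    finA threshold (rest.foldl (stepA d threshold) (acc, some s, some p)) =
      (match rest.dropWhile (fun x => d.getD x 0 == 0) with
       | [] =>
          (if threshold ≤ (rest.takeWhile (fun x => d.getD x 0 == 0)).getLastD p - s + 1
           then acc ++ [(s, (rest.takeWhile (fun x => d.getD x 0 == 0)).getLastD p)] else acc)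
       | _ :: t =>
          finA threshold (t.foldl (stepA d threshold)
            ((if threshold ≤ (rest.takeWhile (fun x => d.getD x 0 == 0)).getLastD p - s + 1
              then acc ++ [(s, (rest.takeWhile (fun x => d.getD x 0 == 0)).getLastD p)] else acc),
             none, none))) := by
  induction rest with
  | nil => intro acc s p; simp [finA]
  | cons x t ih =>
    intro acc s p
    by_cases hx : d.getD x 0 = 0
    · have hstep : stepA d threshold (acc, some s, some p) x = (acc, some s, some x) := by
        simp [stepA, hx]
      simp only [List.foldl_cons, hstep, List.takeWhile_cons, List.dropWhile_cons, hx]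
      simp only [beq_self_eq_true, if_true, List.getLastD_cons]
      exact ih acc s x
    · have hstep : stepA d threshold (acc, some s, some p) x =
        ((if threshold ≤ p - s + 1 then acc ++ [(s, p)] else acc), none, none) := by
        simp [stepA, hx]
      simp only [List.foldl_cons, hstep, List.takeWhile_cons, List.dropWhile_cons]
      have hb : (d.getD x 0 == 0) = false := by simpa using hx
      simp [hb, List.getLastD]

-- Head of dropWhile fails the predicate.
theorem dropWhile_head_false {p : Int → Bool} {l t : List Int} {y : Int}
    (h : l.dropWhile p = y :: t) : p y = false := by
  have := List.head?_dropWhile_not p l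
  rw [h] at this; simpa using this

-- From a fresh state, A's fold-then-finalize equals B's run scanner.
theorem finA_foldl_eq_goB_bounded (d : PySem.Dict Int Int) (threshold : Int) :
    ∀ (n : Nat) (ks : List Int), ks.length ≤ n → ∀ (acc : List (Int × Int)),
    finA threshold (ks.foldl (stepA d threshold) (acc, none, none)) =
      acc ++ goB d threshold ks := by
  intro n
  induction n with
  | zero =>
    intro ks hks acc
    have : ks = [] := List.eq_nil_of_length_eq_zero (Nat.le_zero.mp hks)
    subst this; simp [finA, goB]
  | succ n ihn =>
    intro ks hks
    match ks with
    | [] => intro acc; simp [finA, goB]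
    | ln :: rest =>
      intro acc
      by_cases hx : d.getD ln 0 = 0
      · have hstep : stepA d threshold (acc, none, none) ln = (acc, some ln, some ln) := by
          simp [stepA, hx]
        rw [List.foldl_cons, hstep, finA_foldl_run]
        rw [goB]
        simp only [hx, ne_eq, not_true_eq_false, if_false]
        cases hdw : rest.dropWhile (fun x => d.getD x 0 == 0) with
        | nil => rw [goB]; split_ifs <;> simp
        | cons y t =>
          have hy : (d.getD y 0 == 0) = false := dropWhile_head_false (p := fun x => d.getD x 0 == 0) hdw
          have hlen : t.length ≤ n := by
            have h1 : (rest.dropWhile (fun x => d.getD x 0 == 0)).length ≤ rest.length :=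
              List.length_dropWhile_le _ rest
            rw [hdw] at h1
            simp only [List.length_cons] at h1 hks
            omega
          simp only []
          rw [ihn t hlen]
          rw [goB]
          have hy' : ¬ d.getD y 0 = 0 := by simpa using hy
          simp only [hy', ne_eq, not_false_eq_true, if_true]
          split_ifs <;> simp
      · have hstep : stepA d threshold (acc, none, none) ln = (acc, none, none) := by
          simp [stepA, hx]
        rw [List.foldl_cons, hstep,
            ihn rest (by simp only [List.length_cons] at hks; omega)]
        rw [goB]
        simp [hx]

-- ===== VERDICT (by name: the statement is the Claim_ definition above) =====
theorem find_blocks_spec : Claim_equal_find_blocks := by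
  intro lines_map threshold _
  unfold Spec_find_blocks find_blocks find_blocks_alt
  exact finA_foldl_eq_goB_bounded _ _ _ _ (Nat.le_refl _) []
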